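-- pv_equiv track=rewrite | github.com/thewonderidiot/sunspot | fix_sunspot_b24.py | calc_parity
-- ===== SOURCE A (Python) =====
-- def calc_parity(w):
--     p = 1
--     for i in range(15):
--         if i == 14:
--             i += 1
--
--         if (w & (1 << i)):
--             p ^= 1
--
--     return p
-- ===== SOURCE B (Python) =====
-- def calc_parity(w):
--     return 1 ^ (bin(w & 0xBFFF).count("1") & 1)
-- ===== Notes on version B (the rewrite author's own statement) =====
-- stated objective: simpler
-- what changed: Replaced the fifteen-iteration per-bit loop with its skip-bit-fourteen branch by a single mask (w & 0xBFFF) followed by a popcount, returning the inverted low bit of that popcount.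
import Mathlib
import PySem

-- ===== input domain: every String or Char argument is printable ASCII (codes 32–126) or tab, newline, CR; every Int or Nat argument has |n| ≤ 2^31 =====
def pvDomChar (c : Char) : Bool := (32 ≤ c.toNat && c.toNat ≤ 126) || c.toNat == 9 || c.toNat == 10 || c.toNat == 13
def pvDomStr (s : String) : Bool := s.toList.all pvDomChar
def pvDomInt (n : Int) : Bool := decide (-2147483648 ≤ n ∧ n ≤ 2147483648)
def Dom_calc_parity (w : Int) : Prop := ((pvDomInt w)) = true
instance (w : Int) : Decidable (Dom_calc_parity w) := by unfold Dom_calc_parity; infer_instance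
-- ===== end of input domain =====

-- B computes the same parity bit with a single mask (0xBFFF) and a popcount instead of A's
-- fifteen-iteration per-bit loop with its skip branch; objective: simpler.

-- ===== PORT A =====
-- literal port of A's loop (the loop index is always nonnegative, also after the skip-branch
-- bump, so Python's left shift of one by i is `(1 : Int) <<< i.toNat`)
def calc_parity (w : Int) : Int :=
  (PySem.List.pyRange 0 15 1).foldl (fun p i =>
    let i := if i == 14 then i + 1 else i
    if PySem.Int.band w ((1 : Int) <<< i.toNat) ≠ 0 then PySem.Int.bxor p 1 else p) 1

-- ===== PORT B =====
-- literal port of B: 1 ^ (bin(w & 0xBFFF).count("1") & 1); w & 0xBFFF is nonnegative, and for a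
-- nonnegative value bin(x).count("1") is exactly its population count, i.e. PySem.Int.bitCount
def calc_parity_alt (w : Int) : Int :=
  PySem.Int.bxor 1
    (PySem.Int.band ((PySem.Int.bitCount (PySem.Int.band w 49151) : ℕ) : ℤ) 1)

-- ===== PRECONDITION & SPEC =====
def Spec_calc_parity (w : Int) (out : Int) : Prop := out = calc_parity_alt w
instance (w : Int) (out : Int) : Decidable (Spec_calc_parity w out) := by unfold Spec_calc_parity; infer_instance

-- ===== CLAIM (what is proved, stated in full; the proofs are below) =====
def Claim_equal_calc_parity : Prop := ∀ (w : Int), Dom_calc_parity w → Spec_calc_parity w (calc_parity w)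

-- ===== LEMMAS AND PROOFS =====

-- disjoint-masks addition is xor (no carries)
lemma pvAddXor : ∀ a b : ℕ, a &&& b = 0 → a + b = a ^^^ b := by
  intro a
  induction a using Nat.strong_induction_on with
  | _ a ih =>
    intro b h
    rcases Nat.eq_zero_or_pos a with rfl | ha
    · simp
    have hd : a / 2 &&& b / 2 = 0 := by
      apply Nat.eq_of_testBit_eq
      intro i
      have h1 := congrArg (fun x => x.testBit (i + 1)) h
      simp only [Nat.testBit_and, Nat.zero_testBit] at h1 ⊢
      rw [Nat.testBit_div_two, Nat.testBit_div_two]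
      exact h1
    have hbit : ¬(a % 2 = 1 ∧ b % 2 = 1) := by
      rintro ⟨h1, h2⟩
      have h0 := congrArg (fun x => x.testBit 0) h
      simp [Nat.testBit_zero, h1, h2] at h0
    have ihh := ih (a / 2) (Nat.div_lt_self ha (by norm_num)) (b / 2) hd
    have hx2 : (a ^^^ b) / 2 = a / 2 ^^^ b / 2 := by
      apply Nat.eq_of_testBit_eq
      intro i
      simp [Nat.testBit_div_two, Nat.testBit_xor]
    have hxm : (a ^^^ b) % 2 = (a + b) % 2 := Nat.xor_mod_two_eq
    omega

-- subtracting the common bits is xor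
lemma pvSubAndXor (x n : ℕ) : x - (x &&& n) = x ^^^ (x &&& n) := by
  have hle : x &&& n ≤ x := Nat.and_le_left
  have hdisj : (x ^^^ (x &&& n)) &&& (x &&& n) = 0 := by
    apply Nat.eq_of_testBit_eq
    intro i
    simp only [Nat.testBit_and, Nat.testBit_xor, Nat.zero_testBit]
    cases x.testBit i <;> cases n.testBit i <;> rfl
  have hadd := pvAddXor _ _ hdisj
  have hc : (x ^^^ (x &&& n)) ^^^ (x &&& n) = x := Nat.xor_xor_cancel_right ..
  omega

-- bitCount of m < 2^k is the count of set bit positions below k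
lemma pvBitCountCount : ∀ (k m : ℕ), m < 2 ^ k →
    PySem.Int.bitCount (m : Int) = (List.range k).countP (fun i => m.testBit i) := by
  intro k
  induction k with
  | zero => intro m h; interval_cases m; simp [PySem.Int.bitCount_zero]
  | succ k ih =>
    intro m h
    rcases Nat.eq_zero_or_pos m with rfl | hm
    · simp [PySem.Int.bitCount_zero, Nat.zero_testBit]
    rw [PySem.Int.bitCount_natCast hm, List.range_succ_eq_map]
    rw [List.countP_cons, List.countP_map]
    have hrec := ih (m / 2) (by omega)
    have hcomp : (fun i => m.testBit i) ∘ Nat.succ = fun i => (m / 2).testBit i := by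
      funext i; simp [Nat.testBit_succ]
    rw [hcomp, ← hrec]
    have h0 : m.testBit 0 = decide (m % 2 = 1) := Nat.testBit_zero m
    rcases Nat.mod_two_eq_zero_or_one m with h2 | h2 <;> simp [h0, h2]
    omega

-- xor-ing twice with 1 is the identity
lemma pvBxorBxorOne (p : Int) : PySem.Int.bxor (PySem.Int.bxor p 1) 1 = p := by
  rcases p with a | n
  · simp [PySem.Int.bxor]
  · have h1 : PySem.Int.bxor (Int.negSucc n) 1 = -((n ^^^ 1 : ℕ) : ℤ) - 1 := by
      simp only [PySem.Int.bxor, Int.negSucc_eq]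
      have hn : ¬ (0:ℤ) ≤ -(↑n + 1) := by omega
      rw [if_neg hn, if_pos (by norm_num)]
      norm_num
    rw [h1]
    have h2 : ¬ (0:ℤ) ≤ -((n ^^^ 1 : ℕ) : ℤ) - 1 := by
      have := Int.natCast_nonneg (n ^^^ 1)
      omega
    simp only [PySem.Int.bxor]
    rw [if_neg h2, if_pos (by norm_num)]
    have h3 : (-(-((n ^^^ 1 : ℕ) : ℤ) - 1) - 1).toNat = n ^^^ 1 := by
      have h : (-(-((n ^^^ 1 : ℕ) : ℤ) - 1) - 1) = ((n ^^^ 1 : ℕ) : ℤ) := by ring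
      rw [h]; exact Int.toNat_natCast _
    rw [h3]
    have h4 : (1:ℤ).toNat = 1 := rfl
    rw [h4, Nat.xor_xor_cancel_right, Int.negSucc_eq]
    ring

-- a fold that conditionally xors with 1 is determined by the parity of the count
lemma pvFoldParity (f : Int → Prop) [DecidablePred f] :
    ∀ (L : List Int) (p : Int),
      L.foldl (fun p i => if f i then PySem.Int.bxor p 1 else p) p
        = if L.countP (fun i => decide (f i)) % 2 = 0 then p else PySem.Int.bxor p 1 := by
  intro L
  induction L with
  | nil => intro p; simp
  | cons x L ih =>
    intro p
    rw [List.foldl_cons, ih, List.countP_cons]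
    by_cases hx : f x
    · simp only [hx, decide_true, if_pos]
      rcases Nat.mod_two_eq_zero_or_one (L.countP (fun i => decide (f i))) with h | h
      · rw [if_pos h, if_neg (by omega)]
      · rw [if_neg (by omega), if_pos (by omega), pvBxorBxorOne]
    · simp only [hx, decide_false]
      norm_num

lemma pvRange15 : PySem.List.pyRange 0 15 1 = [0,1,2,3,4,5,6,7,8,9,10,11,12,13,14] := by decide

-- the common closing step: parity of a count against B's bxor/band form
lemma pvFinal (n : ℕ) :
    (((if n % 2 = 0 then 1 else 0 : ℕ)) : ℤ)
      = PySem.Int.bxor 1 (PySem.Int.band ((n:ℕ) : ℤ) 1) := by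
  have hb : PySem.Int.band ((n:ℕ) : ℤ) 1 = ((n &&& 1 : ℕ) : ℤ) := by
    have := PySem.Int.band_natCast n 1
    simpa using this
  rw [hb, Nat.and_one_is_mod]
  rcases Nat.mod_two_eq_zero_or_one n with h | h <;> rw [h]
  · simp
  · decide

-- bit test for a nonnegative argument
lemma pvCondNat (a j : ℕ) :
    (PySem.Int.band ((a : ℕ) : ℤ) ((1:Int) <<< j) = 0) ↔ a.testBit j = false := by
  have hs : (1:Int) <<< j = ((2 ^ j : ℕ) : ℤ) := by simp [Int.shiftLeft_eq]
  rw [hs, PySem.Int.band_natCast, Nat.and_two_pow]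
  cases h : a.testBit j <;> simp

-- bit test for a negative argument (w = -(n+1); Python's w & (1<<j) is nonzero iff bit j of n is clear)
lemma pvCondNeg (n j : ℕ) :
    (PySem.Int.band (Int.negSucc n) ((1:Int) <<< j) = 0) ↔ n.testBit j = true := by
  have hs : (1:Int) <<< j = ((2 ^ j : ℕ) : ℤ) := by simp [Int.shiftLeft_eq]
  rw [hs]
  simp only [PySem.Int.band, Int.negSucc_eq]
  rw [if_neg (by omega), if_pos (Int.natCast_nonneg _)]
  have h1 : (-(-((n:ℤ) + 1)) - 1).toNat = n := by omega
  have h2 : ((2 ^ j : ℕ) : ℤ).toNat = 2 ^ j := Int.toNat_natCast _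
  rw [h1, h2, Nat.and_comm, Nat.and_two_pow]
  cases h : n.testBit j <;> simp

lemma pvCaseNonneg (a : ℕ) : calc_parity (a : ℤ) = calc_parity_alt (a : ℤ) := by
  rw [calc_parity, pvRange15]
  show ([0,1,2,3,4,5,6,7,8,9,10,11,12,13,14] : List ℤ).foldl
      (fun p i => if PySem.Int.band (a : ℤ) ((1 : Int) <<< ((if i == 14 then i + 1 else i).toNat : ℕ)) ≠ 0
        then PySem.Int.bxor p 1 else p) 1 = calc_parity_alt (a : ℤ)
  rw [pvFoldParity]
  simp only [List.countP_cons, List.countP_nil]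
  norm_num
  have t15 : Int.toNat 15 = (15:ℕ) := rfl
  have t13 : Int.toNat 13 = (13:ℕ) := rfl
  have t12 : Int.toNat 12 = (12:ℕ) := rfl
  have t11 : Int.toNat 11 = (11:ℕ) := rfl
  have t10 : Int.toNat 10 = (10:ℕ) := rfl
  have t9 : Int.toNat 9 = (9:ℕ) := rfl
  have t8 : Int.toNat 8 = (8:ℕ) := rfl
  have t7 : Int.toNat 7 = (7:ℕ) := rfl
  have t6 : Int.toNat 6 = (6:ℕ) := rfl
  have t5 : Int.toNat 5 = (5:ℕ) := rfl
  have t4 : Int.toNat 4 = (4:ℕ) := rfl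
  have t3 : Int.toNat 3 = (3:ℕ) := rfl
  have t2 : Int.toNat 2 = (2:ℕ) := rfl
  simp only [t15, t13, t12, t11, t10, t9, t8, t7, t6, t5, t4, t3, t2]
  have c0 : (PySem.Int.band ((a:ℕ) : ℤ) 1 = 0) ↔ a.testBit 0 = false := by
    have h := pvCondNat a 0
    simpa using h
  simp only [pvCondNat, c0]
  rw [calc_parity_alt]
  have hb : PySem.Int.band ((a:ℕ):ℤ) 49151 = (((a &&& 49151 : ℕ)) : ℤ) := by
    have := PySem.Int.band_natCast a 49151
    simpa using this
  rw [hb, pvBitCountCount 16 (a &&& 49151)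
    (by have := Nat.and_le_right (n := a) (m := 49151); omega)]
  have hr16 : List.range 16 = [0,1,2,3,4,5,6,7,8,9,10,11,12,13,14,15] := by rfl
  rw [hr16]
  simp only [List.countP_cons, List.countP_nil, Nat.testBit_and]
  norm_num
  have m14 : Nat.testBit 49151 14 = false := by decide
  have m1 : Nat.testBit 49151 1 = true := by decide
  have m2 : Nat.testBit 49151 2 = true := by decide
  have m3 : Nat.testBit 49151 3 = true := by decide
  have m4 : Nat.testBit 49151 4 = true := by decide
  have m5 : Nat.testBit 49151 5 = true := by decide
  have m6 : Nat.testBit 49151 6 = true := by decide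
  have m7 : Nat.testBit 49151 7 = true := by decide
  have m8 : Nat.testBit 49151 8 = true := by decide
  have m9 : Nat.testBit 49151 9 = true := by decide
  have m10 : Nat.testBit 49151 10 = true := by decide
  have m11 : Nat.testBit 49151 11 = true := by decide
  have m12 : Nat.testBit 49151 12 = true := by decide
  have m13 : Nat.testBit 49151 13 = true := by decide
  have m15 : Nat.testBit 49151 15 = true := by decide
  simp only [m14, m1, m2, m3, m4, m5, m6, m7, m8, m9, m10, m11, m12, m13, m15, and_true]
  have indflip : ∀ b : Bool, (if b = false then 0 else 1 : ℕ) = if b = true then 1 else 0 := by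
    intro b; cases b <;> rfl
  simp only [indflip]
  norm_num
  have hmod : (if a % 2 = 0 then (0:ℕ) else 1) = if a % 2 = 1 then 1 else 0 := by
    rcases Nat.mod_two_eq_zero_or_one a with h | h <;> simp [h]
  rw [hmod]
  norm_cast
  exact pvFinal _

lemma pvCaseNeg (n : ℕ) : calc_parity (Int.negSucc n) = calc_parity_alt (Int.negSucc n) := by
  rw [calc_parity, pvRange15]
  show ([0,1,2,3,4,5,6,7,8,9,10,11,12,13,14] : List ℤ).foldl
      (fun p i => if PySem.Int.band (Int.negSucc n) ((1 : Int) <<< ((if i == 14 then i + 1 else i).toNat : ℕ)) ≠ 0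
        then PySem.Int.bxor p 1 else p) 1 = calc_parity_alt (Int.negSucc n)
  rw [pvFoldParity]
  simp only [List.countP_cons, List.countP_nil]
  norm_num
  have t15 : Int.toNat 15 = (15:ℕ) := rfl
  have t13 : Int.toNat 13 = (13:ℕ) := rfl
  have t12 : Int.toNat 12 = (12:ℕ) := rfl
  have t11 : Int.toNat 11 = (11:ℕ) := rfl
  have t10 : Int.toNat 10 = (10:ℕ) := rfl
  have t9 : Int.toNat 9 = (9:ℕ) := rfl
  have t8 : Int.toNat 8 = (8:ℕ) := rfl
  have t7 : Int.toNat 7 = (7:ℕ) := rfl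
  have t6 : Int.toNat 6 = (6:ℕ) := rfl
  have t5 : Int.toNat 5 = (5:ℕ) := rfl
  have t4 : Int.toNat 4 = (4:ℕ) := rfl
  have t3 : Int.toNat 3 = (3:ℕ) := rfl
  have t2 : Int.toNat 2 = (2:ℕ) := rfl
  simp only [t15, t13, t12, t11, t10, t9, t8, t7, t6, t5, t4, t3, t2]
  have c0 : (PySem.Int.band (Int.negSucc n) 1 = 0) ↔ n.testBit 0 = true := by
    have h := pvCondNeg n 0
    simpa using h
  simp only [pvCondNeg, c0]
  have flip2 : ∀ t : Bool, (if t = true then (0:ℕ) else 1) = if (!t) = true then 1 else 0 := by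
    intro t; cases t <;> rfl
  simp only [flip2]
  rw [calc_parity_alt]
  have hbneg : PySem.Int.band (Int.negSucc n) 49151 = ((49151 - (49151 &&& n) : ℕ) : ℤ) := by
    simp only [PySem.Int.band, Int.negSucc_eq]
    rw [if_neg (by omega), if_pos (by norm_num)]
    norm_num
    rw [show Int.toNat 49151 = 49151 from rfl]
  rw [hbneg, pvBitCountCount 16 _ (by omega)]
  have hr16 : List.range 16 = [0,1,2,3,4,5,6,7,8,9,10,11,12,13,14,15] := by rfl
  rw [hr16]
  have hbit : ∀ j, (49151 - (49151 &&& n)).testBit j = (Nat.testBit 49151 j && !n.testBit j) := by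
    intro j
    rw [pvSubAndXor]
    simp only [Nat.testBit_xor, Nat.testBit_and]
    cases Nat.testBit 49151 j <;> cases n.testBit j <;> rfl
  simp only [List.countP_cons, List.countP_nil, hbit]
  have m14 : Nat.testBit 49151 14 = false := by decide
  have m0 : Nat.testBit 49151 0 = true := by decide
  have m1 : Nat.testBit 49151 1 = true := by decide
  have m2 : Nat.testBit 49151 2 = true := by decide
  have m3 : Nat.testBit 49151 3 = true := by decide
  have m4 : Nat.testBit 49151 4 = true := by decide
  have m5 : Nat.testBit 49151 5 = true := by decide
  have m6 : Nat.testBit 49151 6 = true := by decide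
  have m7 : Nat.testBit 49151 7 = true := by decide
  have m8 : Nat.testBit 49151 8 = true := by decide
  have m9 : Nat.testBit 49151 9 = true := by decide
  have m10 : Nat.testBit 49151 10 = true := by decide
  have m11 : Nat.testBit 49151 11 = true := by decide
  have m12 : Nat.testBit 49151 12 = true := by decide
  have m13 : Nat.testBit 49151 13 = true := by decide
  have m15 : Nat.testBit 49151 15 = true := by decide
  simp only [m14, m0, m1, m2, m3, m4, m5, m6, m7, m8, m9, m10, m11, m12, m13, m15,
    Bool.true_and, Bool.false_and]
  norm_num
  norm_cast
  exact pvFinal _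

-- ===== VERDICT (by name: the statement is the Claim_ definition above) =====
theorem calc_parity_spec : Claim_equal_calc_parity := by
  intro w _
  unfold Spec_calc_parity
  cases w with
  | ofNat a => exact pvCaseNonneg a
  | negSucc n => exact pvCaseNeg n
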